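-- pv_equiv track=rewrite | github.com/Eosn/IP-calculator | Trabalho 5 - RCI e PROG1.py | f_separaip
-- ===== SOURCE A (Python) =====
-- def f_separaip(bi): #Função que separa os endereços de IP e máscara de subrede informados para possibilitar o uso das demais funções
-- 	posipont = [] #Define a posição dos pontos como uma lista vazia
-- 	ipF = [] #Define o IP final como uma lista vazia
-- 	x = 0 #Define X como zero
-- 	aux = 0 #Define a variável auxiliar como zero
-- 	for j in range(len(bi)): #Cria um loop cujo ponto de parada é j ser o tamanho do endereço informado
-- 		if bi[j] == "." : #Cria uma condição para identificar as strings de ponto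
-- 			posipont = posipont + [j] #Define a posição do ponto como o mesmo adicionado à posição do ponto
-- 	posipont = posipont + [len(bi)] #Define a posição do ponto como o mesmo adicionado ao tamanho do endereço
-- 	for i in posipont : #Cria um loop cujo ponto de parada seja a posição de parada é a variável posipont
-- 		aux = int(bi[x:i]) #Define a variável auxiliar como o inteiro da posição x à posição i do endereço
-- 		ipF = ipF + [aux] #Define o IP final como o mesmo adicionado à lista da variável auxiliar
-- 		x = i + 1 #Define X como i somado à 1
-- 	return ipF #Retorna o IP final
-- ===== SOURCE B (Python) =====
-- def f_separaip(bi):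
--     return [int(seg) for seg in bi.split(".")]
-- ===== Notes on version B (the rewrite author's own statement) =====
-- stated objective: idiomatic
-- what changed: A's two-pass strategy (scan for dot indices plus a len(bi) sentinel, then slice between consecutive indices) is replaced by a single bi.split('.') with an int() list comprehension.
import Mathlib
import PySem

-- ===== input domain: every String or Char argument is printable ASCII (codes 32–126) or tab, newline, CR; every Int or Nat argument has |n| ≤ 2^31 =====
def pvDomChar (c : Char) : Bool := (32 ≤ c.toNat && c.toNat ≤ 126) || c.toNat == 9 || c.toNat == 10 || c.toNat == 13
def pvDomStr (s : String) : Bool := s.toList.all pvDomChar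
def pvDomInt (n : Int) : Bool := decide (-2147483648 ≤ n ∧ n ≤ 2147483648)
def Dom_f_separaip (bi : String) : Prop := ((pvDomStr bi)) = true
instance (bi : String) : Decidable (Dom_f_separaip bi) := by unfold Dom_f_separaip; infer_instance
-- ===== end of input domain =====

-- B replaces A's two-pass dot-position scan + manual slicing with a single str.split(".")
-- and an int() comprehension (objective: idiomatic). Equal return values wherever A returns.


-- ===== PORT A =====
-- literal transliteration of A: first loop collects the indices of '.', the sentinel len(bi)
-- is appended, the second loop slices between consecutive indices and converts with int().
-- int() raising ValueError is PySem.Int.ofChars? = none; those inputs are outside Pre_ (getD 0 is never reached inside Pre_).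
def f_separaip (bi : String) : List Int :=
  let cs := bi.toList
  let posipont : List Int :=
    (PySem.List.pyRange 0 (cs.length : Int) 1).foldl
      (fun p j => if PySem.List.pyGetD cs j ' ' == '.' then p ++ [j] else p) []
  let posipont2 := posipont ++ [(cs.length : Int)]
  (posipont2.foldl
    (fun (st : Int × List Int) i =>
      (i + 1, st.2 ++ [(PySem.Int.ofChars? (PySem.List.slice cs (some st.1) (some i))).getD 0]))
    ((0 : Int), ([] : List Int))).2

-- ===== PORT B =====
-- literal transliteration of B: [int(seg) for seg in bi.split(".")]
def f_separaip_alt (bi : String) : List Int :=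
  ((PySem.Str.split? bi ".").getD []).map (fun seg => (PySem.Int.ofStr? seg).getD 0)

-- ===== PRECONDITION & SPEC =====
-- Pre_ excludes exactly the inputs where Python's int() raises ValueError: some
-- dot-separated segment of bi does not parse as an int; both A and B raise there.
def Pre_f_separaip (bi : String) : Prop :=
  ∀ seg ∈ PySem.Chars.splitOn bi.toList ['.'], (PySem.Int.ofChars? seg).isSome = true
instance (bi : String) : Decidable (Pre_f_separaip bi) := by unfold Pre_f_separaip; infer_instance
def pvWitness_f_separaip : String := "192.168.0.1"

def Spec_f_separaip (bi : String) (out : List Int) : Prop := out = f_separaip_alt bi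
instance (bi : String) (out : List Int) : Decidable (Spec_f_separaip bi out) := by
  unfold Spec_f_separaip; infer_instance

-- ===== CLAIM (what is proved, stated in full; the proofs are below) =====
def Claim_equal_f_separaip : Prop :=
  ∀ (bi : String), Dom_f_separaip bi → Pre_f_separaip bi → Spec_f_separaip bi (f_separaip bi)

-- ===== LEMMAS AND PROOFS =====

-- the segments of a char list split at '.', by simple structural recursion (always nonempty)
def segs : List Char → List (List Char)
  | [] => [[]]
  | c :: rest =>
    if c = '.' then [] :: segs rest
    else match segs rest with
      | [] => [[c]]
      | s :: ss => (c :: s) :: ss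

-- prepend a prefix onto the first segment
def consHead (pre : List Char) : List (List Char) → List (List Char)
  | [] => [pre]
  | s :: ss => (pre ++ s) :: ss

-- indices of '.' in a char list
def dotIdx : List Char → List Nat
  | [] => []
  | c :: rest => if c = '.' then 0 :: (dotIdx rest).map (· + 1) else (dotIdx rest).map (· + 1)

theorem segs_ne_nil (cs : List Char) : segs cs ≠ [] := by
  cases cs with
  | nil => simp [segs]
  | cons c rest =>
    simp only [segs]
    split
    · simp
    · split <;> simp_all

theorem consHead_nil_of_ne (l : List (List Char)) (h : l ≠ []) : consHead [] l = l := by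
  cases l with
  | nil => exact absurd rfl h
  | cons s ss => simp [consHead]

theorem consHead_append (a : List Char) (c : Char) (l : List (List Char)) (h : l ≠ []) :
    consHead a (consHead [c] l) = consHead (a ++ [c]) l := by
  cases l with
  | nil => exact absurd rfl h
  | cons s ss => simp [consHead]

theorem segs_cons_of_ne (c : Char) (rest : List Char) (h : ¬ c = '.') :
    segs (c :: rest) = consHead [c] (segs rest) := by
  simp only [segs, if_neg h]
  cases hr : segs rest with
  | nil => exact absurd hr (segs_ne_nil rest)
  | cons s ss => simp [consHead]

-- splitOn.go with separator ['.'] computes segs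
theorem splitOn_go_eq (l : List Char) : ∀ (fuel : Nat), l.length ≤ fuel →
    ∀ (cur : List Char) (acc : List (List Char)),
    PySem.Chars.splitOn.go ['.'] fuel l cur acc
      = acc.reverse ++ consHead cur.reverse (segs l) := by
  induction l with
  | nil =>
    intro fuel _ cur acc
    cases fuel <;> simp [PySem.Chars.splitOn.go, segs, consHead]
  | cons c rest ih =>
    intro fuel hf cur acc
    cases fuel with
    | zero => simp at hf
    | succ f =>
      have hlen : rest.length ≤ f := by simp at hf; omega
      by_cases hc : c = '.'
      · subst hc
        have hpre : List.isPrefixOf ['.'] ('.' :: rest) = true := by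
          simp [List.isPrefixOf]
        rw [PySem.Chars.splitOn.go]
        simp only [hpre, if_pos, List.drop_succ_cons, List.drop_zero, List.length_singleton]
        rw [ih f hlen [] (cur.reverse :: acc), List.reverse_nil,
            consHead_nil_of_ne _ (segs_ne_nil rest)]
        simp [segs, consHead]
      · have hpre : List.isPrefixOf ['.'] (c :: rest) = false := by
          simp [List.isPrefixOf]
          intro h; exact hc h.symm
        rw [PySem.Chars.splitOn.go]
        simp only [hpre, Bool.false_eq_true, if_false]
        rw [ih f hlen (c :: cur) acc]
        rw [segs_cons_of_ne c rest hc,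
            consHead_append cur.reverse c (segs rest) (segs_ne_nil rest)]
        simp

theorem splitOn_eq_segs (cs : List Char) : PySem.Chars.splitOn cs ['.'] = segs cs := by
  rw [PySem.Chars.splitOn, splitOn_go_eq cs (cs.length + 1) (by omega) [] []]
  simp [consHead_nil_of_ne _ (segs_ne_nil cs)]

-- phase 1 of A: the index loop collects exactly the dot indices
theorem phase1_eq (full : List Char) : ∀ (cs : List Char) (off : Nat) (acc : List Int),
    full.drop off = cs →
    (PySem.List.pyRange (off : Int) ((off + cs.length : Nat) : Int) 1).foldl
      (fun p j => if PySem.List.pyGetD full j ' ' == '.' then p ++ [j] else p) acc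
    = acc ++ (dotIdx cs).map (fun p => ((p + off : Nat) : Int)) := by
  intro cs
  induction cs with
  | nil =>
    intro off acc _
    rw [PySem.List.pyRange_one_eq_nil (by simp)]
    simp [dotIdx]
  | cons c rest ih =>
    intro off acc hdrop
    have hco : full[off]? = some c := by
      have h0 : (full.drop off)[0]? = full[off + 0]? := List.getElem?_drop
      rw [hdrop] at h0
      simpa using h0.symm
    have hget : PySem.List.pyGetD full ((off : Nat) : Int) ' ' = c := by
      rw [PySem.List.pyGetD_natCast]
      simp [List.getD, hco]
    have hdrop' : full.drop (off + 1) = rest := by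
      have h : List.drop 1 (List.drop off full) = List.drop (off + 1) full := List.drop_drop
      rw [hdrop] at h
      simpa using h.symm
    rw [PySem.List.pyRange_one_cons
      (by exact_mod_cast (show off < off + (c :: rest).length by
        simp only [List.length_cons]; omega))]
    rw [List.foldl_cons, hget]
    have hcast : ((off : Nat) : Int) + 1 = (((off + 1 : Nat)) : Int) := by push_cast; ring
    have hcast2 : ((off + (c :: rest).length : Nat) : Int) = (((off + 1) + rest.length : Nat) : Int) := by
      simp only [List.length_cons]; push_cast; ring
    rw [hcast, hcast2]
    have hmap : (dotIdx rest).map (fun p => ((p + (off + 1) : Nat) : Int))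
        = ((dotIdx rest).map (· + 1)).map (fun p => ((p + off : Nat) : Int)) := by
      rw [List.map_map]
      apply List.map_congr_left
      intro p _
      simp only [Function.comp_apply]
      push_cast; ring
    by_cases hc : c = '.'
    · subst hc
      rw [if_pos (by simp)]
      rw [ih (off + 1) (acc ++ [((off : Nat) : Int)]) hdrop', hmap]
      have hdot : dotIdx ('.' :: rest) = 0 :: (dotIdx rest).map (· + 1) := by simp [dotIdx]
      rw [hdot, List.map_cons, List.append_assoc, List.singleton_append]
      simp
    · rw [if_neg (by simp [hc])]
      rw [ih (off + 1) acc hdrop', hmap]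
      have hdot : dotIdx (c :: rest) = (dotIdx rest).map (· + 1) := by simp [dotIdx, hc]
      rw [hdot]

theorem take_succ_seg (full : List Char) (x off : Nat) (c : Char) (rest : List Char)
    (hx : x ≤ off) (h : full.drop off = c :: rest) :
    (full.drop x).take (off + 1 - x) = (full.drop x).take (off - x) ++ [c] := by
  have h1 : (full.drop x).drop (off - x) = c :: rest := by
    have h' : List.drop (off - x) (List.drop x full) = List.drop (x + (off - x)) full :=
      List.drop_drop
    rw [show x + (off - x) = off by omega] at h'
    rw [h', h]
  have h2 : (full.drop x)[off - x]? = some c := by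
    have h0 : ((full.drop x).drop (off - x))[0]? = (full.drop x)[(off - x) + 0]? :=
      List.getElem?_drop
    rw [h1] at h0
    simpa using h0.symm
  rw [show off + 1 - x = (off - x) + 1 by omega, List.take_add_one, h2]
  rfl

-- phase 2 of A: the slicing loop produces int() of each segment
theorem phase2_eq (full : List Char) : ∀ (cs : List Char) (x off : Nat) (acc : List Int),
    x ≤ off → full.drop off = cs →
    (((dotIdx cs).map (fun p => ((p + off : Nat) : Int)) ++ [((off + cs.length : Nat) : Int)]).foldl
      (fun (st : Int × List Int) i =>
        (i + 1, st.2 ++ [(PySem.Int.ofChars? (PySem.List.slice full (some st.1) (some i))).getD 0]))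
      (((x : Nat) : Int), acc)).2
    = acc ++ ((consHead ((full.drop x).take (off - x)) (segs cs)).map
        (fun seg => (PySem.Int.ofChars? seg).getD 0)) := by
  intro cs
  induction cs with
  | nil =>
    intro x off acc hx _
    simp only [dotIdx, List.map_nil, List.nil_append, List.length_nil, Nat.add_zero,
      List.foldl_cons, List.foldl_nil]
    rw [PySem.List.slice_natCast]
    simp [segs, consHead]
  | cons c rest ih =>
    intro x off acc hx hdrop
    have hdrop' : full.drop (off + 1) = rest := by
      have h : List.drop 1 (List.drop off full) = List.drop (off + 1) full := List.drop_drop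
      rw [hdrop] at h
      simpa using h.symm
    have hlen : ((off + (c :: rest).length : Nat) : Int) = (((off + 1) + rest.length : Nat) : Int) := by
      simp only [List.length_cons]; push_cast; ring
    have hmap : ((dotIdx rest).map (· + 1)).map (fun p => ((p + off : Nat) : Int))
        = (dotIdx rest).map (fun p => ((p + (off + 1) : Nat) : Int)) := by
      rw [List.map_map]
      apply List.map_congr_left
      intro p _
      simp only [Function.comp_apply]
      push_cast; ring
    by_cases hc : c = '.'
    · subst hc
      have hdot : dotIdx ('.' :: rest) = 0 :: (dotIdx rest).map (· + 1) := by simp [dotIdx]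
      have hseg : segs ('.' :: rest) = [] :: segs rest := by simp [segs]
      rw [hdot, hseg, hlen, List.map_cons, List.cons_append, List.foldl_cons]
      rw [show ((0 + off : Nat) : Int) = ((off : Nat) : Int) by push_cast; ring]
      rw [PySem.List.slice_natCast]
      rw [show ((off : Nat) : Int) + 1 = (((off + 1 : Nat)) : Int) by push_cast; ring]
      rw [hmap, ih (off + 1) (off + 1)
        (acc ++ [(PySem.Int.ofChars? ((full.drop x).take (off - x))).getD 0]) (le_refl _) hdrop']
      rw [Nat.sub_self, List.take_zero, consHead_nil_of_ne _ (segs_ne_nil rest)]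
      simp [consHead]
    · have hdot : dotIdx (c :: rest) = (dotIdx rest).map (· + 1) := by simp [dotIdx, hc]
      rw [hdot, hlen, hmap, ih x (off + 1) acc (by omega) hdrop']
      rw [take_succ_seg full x off c rest hx hdrop]
      rw [segs_cons_of_ne c rest hc,
          consHead_append _ c (segs rest) (segs_ne_nil rest)]

theorem portA_eq (bi : String) :
    f_separaip bi = (segs bi.toList).map (fun seg => (PySem.Int.ofChars? seg).getD 0) := by
  have h1 := phase1_eq bi.toList bi.toList 0 [] (by simp)
  have h2 := phase2_eq bi.toList bi.toList 0 0 [] (le_refl 0) (by simp)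
  simp only [Nat.zero_add, Nat.cast_zero, Nat.add_zero, Nat.sub_zero, List.take_zero,
    List.drop_zero, List.nil_append] at h1 h2
  rw [consHead_nil_of_ne _ (segs_ne_nil bi.toList)] at h2
  simp only [f_separaip]
  rw [h1, h2]

theorem portB_eq (bi : String) :
    f_separaip_alt bi = (segs bi.toList).map (fun seg => (PySem.Int.ofChars? seg).getD 0) := by
  unfold f_separaip_alt
  rw [PySem.Str.split?, show ("." : String).toList = ['.'] from rfl,
      PySem.Chars.split?, splitOn_eq_segs]
  simp only [List.isEmpty_cons, Bool.false_eq_true, if_false, Option.map_some,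
    Option.getD_some, List.map_map]
  apply List.map_congr_left
  intro seg _
  simp [Function.comp, PySem.Int.ofStr?]

-- ===== VERDICT (by name: the statement is the Claim_ definition above) =====
theorem f_separaip_spec : Claim_equal_f_separaip := by
  intro bi _ _
  unfold Spec_f_separaip
  rw [portA_eq, portB_eq]
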